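-- pv_equiv track=rewrite | github.com/arterial-io/mesh | mesh/doc/generator.py | _collate_fields
-- ===== SOURCE A (Python) =====
-- def _collate_fields(fields, top=('id',)):
--     for name in top:
--         if name in fields:
--             yield name, fields[name]
--
--     buckets = [], [], [], [], [], []
--     for name, field in sorted(fields.items()):
--         if name not in top:
--             structural = field.get('structural', False)
--             if field.get('readonly'):
--                 if structural:
--                     buckets[5].append((name, field))
--                 else:
--                     buckets[4].append((name, field))
--             elif field.get('required'):
--                 if structural:
--                     buckets[1].append((name, field))
--                 else:
--                     buckets[0].append((name, field))
--             else:
--                 if structural: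
--                     buckets[3].append((name, field))
--                 else:
--                     buckets[2].append((name, field))
--
--     for bucket in buckets:
--         for name, field in bucket:
--             yield name, field
-- ===== SOURCE B (Python) =====
-- def _rank(field):
--     structural = field.get('structural', False)
--     if field.get('readonly'):
--         return 5 if structural else 4
--     if field.get('required'):
--         return 1 if structural else 0
--     return 3 if structural else 2
--
--
-- def _collate_fields(fields, top=('id',)):
--     out = []
--     for name in top:
--         if name in fields:
--             out.append((name, fields[name]))
--     rest = [(n, f) for n, f in fields.items() if n not in top]
--     out.extend(sorted(rest, key=lambda nf: (_rank(nf[1]), nf[0])))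
--     return out
-- ===== Notes on version B (the rewrite author's own statement) =====
-- stated objective: simpler
-- what changed: B replaces A's six maintained bucket lists and their concatenation loops with one helper rank(field) (category index 0-5) and a single stable sort of the non-top fields by the composite key (rank, name).
import Mathlib
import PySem

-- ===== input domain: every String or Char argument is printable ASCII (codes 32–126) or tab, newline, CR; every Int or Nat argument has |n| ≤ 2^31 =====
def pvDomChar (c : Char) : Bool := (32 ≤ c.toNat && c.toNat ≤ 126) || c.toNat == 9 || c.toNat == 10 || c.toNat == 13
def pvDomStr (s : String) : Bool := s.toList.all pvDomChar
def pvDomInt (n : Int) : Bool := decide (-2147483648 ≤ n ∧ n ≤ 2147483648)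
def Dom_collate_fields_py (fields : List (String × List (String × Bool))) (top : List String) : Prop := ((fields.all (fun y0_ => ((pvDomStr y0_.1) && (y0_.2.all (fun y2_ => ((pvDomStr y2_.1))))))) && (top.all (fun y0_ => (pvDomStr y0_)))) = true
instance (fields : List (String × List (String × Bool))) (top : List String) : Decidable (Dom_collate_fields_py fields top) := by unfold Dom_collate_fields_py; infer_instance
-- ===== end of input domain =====

-- B replaces A's six maintained bucket lists and concatenation loops with one
-- stable sort of the non-top fields by the composite key (rank, name); objective: simpler.

-- ===== PORT A =====
-- the six bucket lists A maintains
structure PvBuckets : Type where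
  b0 : List (String × List (String × Bool))
  b1 : List (String × List (String × Bool))
  b2 : List (String × List (String × Bool))
  b3 : List (String × List (String × Bool))
  b4 : List (String × List (String × Bool))
  b5 : List (String × List (String × Bool))

def collate_fields_py (fields : List (String × List (String × Bool))) (top : List String) : List (String × (List (String × Bool))) :=
  -- for name in top: if name in fields: yield name, fields[name]
  let topOut := top.foldl (fun acc name =>
    match (PySem.Dict.mk fields).get? name with
    | some f => acc ++ [(name, f)]
    | none => acc) []
  -- for name, field in sorted(fields.items()): … buckets[i].append((name, field))
  -- (the pairs are compared by name: dict keys are unique, so Python never compares the dict values)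
  let bks := (PySem.List.sorted fields (fun nf => nf.1) false).foldl (fun (b : PvBuckets) nf =>
    if !(top.contains nf.1) then
      let structural := (PySem.Dict.mk nf.2).getD "structural" false
      if (PySem.Dict.mk nf.2).getD "readonly" false then
        (if structural then { b with b5 := b.b5 ++ [nf] } else { b with b4 := b.b4 ++ [nf] })
      else if (PySem.Dict.mk nf.2).getD "required" false then
        (if structural then { b with b1 := b.b1 ++ [nf] } else { b with b0 := b.b0 ++ [nf] })
      else
        (if structural then { b with b3 := b.b3 ++ [nf] } else { b with b2 := b.b2 ++ [nf] })
    else b) ⟨[], [], [], [], [], []⟩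
  -- for bucket in buckets: for name, field in bucket: yield name, field
  topOut ++ ([bks.b0, bks.b1, bks.b2, bks.b3, bks.b4, bks.b5].foldl (fun acc bucket => acc ++ bucket) [])

-- ===== PORT B =====
-- helper _rank(field) of Source B: the category index 0–5
def pvRank (field : List (String × Bool)) : Nat :=
  let structural := (PySem.Dict.mk field).getD "structural" false
  if (PySem.Dict.mk field).getD "readonly" false then (if structural then 5 else 4)
  else if (PySem.Dict.mk field).getD "required" false then (if structural then 1 else 0)
  else (if structural then 3 else 2)

def collate_fields_py_alt (fields : List (String × List (String × Bool))) (top : List String) : List (String × (List (String × Bool))) :=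
  -- for name in top: if name in fields: out.append((name, fields[name]))
  let out := top.foldl (fun acc name =>
    match (PySem.Dict.mk fields).get? name with
    | some f => acc ++ [(name, f)]
    | none => acc) []
  -- rest = [(n, f) for n, f in fields.items() if n not in top]
  let rest := fields.filter (fun nf => !(top.contains nf.1))
  -- out.extend(sorted(rest, key=lambda nf: (_rank(nf[1]), nf[0])))
  out ++ PySem.List.sorted2 rest (fun nf => pvRank nf.2) (fun nf => nf.1) false

-- ===== PRECONDITION & SPEC =====
-- Pre_ requires distinct field names: a Python dict cannot contain duplicate keys, so the
-- excluded association lists represent no Python input of A at all.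
def Pre_collate_fields_py (fields : List (String × List (String × Bool))) (top : List String) : Prop :=
  (fields.map Prod.fst).Nodup
instance (fields : List (String × List (String × Bool))) (top : List String) : Decidable (Pre_collate_fields_py fields top) := by unfold Pre_collate_fields_py; infer_instance

def pvWitness_collate_fields_py : (List (String × List (String × Bool))) × List String :=
  ([("id", [("required", true)]), ("b", [("readonly", true)]), ("a", [])], ["id"])

def Spec_collate_fields_py (fields : List (String × List (String × Bool))) (top : List String) (out : List (String × (List (String × Bool)))) : Prop := out = collate_fields_py_alt fields top
instance (fields : List (String × List (String × Bool))) (top : List String) (out : List (String × (List (String × Bool)))) : Decidable (Spec_collate_fields_py fields top out) := by unfold Spec_collate_fields_py; infer_instance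

-- ===== CLAIM (what is proved, stated in full; the proofs are below) =====
def Claim_equal_collate_fields_py : Prop := ∀ (fields : List (String × List (String × Bool))) (top : List String), Dom_collate_fields_py fields top → Pre_collate_fields_py fields top → Spec_collate_fields_py fields top (collate_fields_py fields top)

-- ===== LEMMAS AND PROOFS =====

-- weak lexicographic order on (rank, name): the order both rest-parts are arranged in
def pvKeyLe (a b : String × List (String × Bool)) : Prop :=
  pvRank a.2 < pvRank b.2 ∨ (pvRank a.2 = pvRank b.2 ∧ a.1 ≤ b.1)

-- the Bool comparison sorted2 uses
def pvBefore (a b : String × List (String × Bool)) : Bool :=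
  decide (pvRank a.2 < pvRank b.2) || (!decide (pvRank b.2 < pvRank a.2) && decide (a.1 < b.1))

lemma pvKeyLe_trans {a b c} (h1 : pvKeyLe a b) (h2 : pvKeyLe b c) : pvKeyLe a c := by
  unfold pvKeyLe at *
  rcases h1 with h1 | ⟨h1, h1'⟩ <;> rcases h2 with h2 | ⟨h2, h2'⟩
  · exact Or.inl (h1.trans h2)
  · exact Or.inl (h2 ▸ h1)
  · exact Or.inl (h1 ▸ h2)
  · exact Or.inr ⟨h1.trans h2, h1'.trans h2'⟩

lemma pvBefore_true {a b} (h : pvBefore a b = true) : pvKeyLe a b := by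
  unfold pvBefore at h; unfold pvKeyLe
  by_cases hab : pvRank a.2 < pvRank b.2
  · exact Or.inl hab
  by_cases hba : pvRank b.2 < pvRank a.2
  · simp [hab, hba] at h
  by_cases hn : a.1 < b.1
  · exact Or.inr ⟨by omega, le_of_lt hn⟩
  · simp [hab, hba, hn] at h

lemma pvBefore_false {a b} (h : pvBefore a b = false) : pvKeyLe b a := by
  unfold pvBefore at h; unfold pvKeyLe
  by_cases hab : pvRank a.2 < pvRank b.2
  · simp [hab] at h
  by_cases hba : pvRank b.2 < pvRank a.2
  · exact Or.inl hba
  by_cases hn : a.1 < b.1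
  · simp [hab, hba, hn] at h
  · exact Or.inr ⟨by omega, le_of_not_gt hn⟩

lemma insertBy_pairwise_pvKeyLe (x : String × List (String × Bool)) (ys : List (String × List (String × Bool)))
    (h : ys.Pairwise pvKeyLe) : (PySem.List.insertBy pvBefore x ys).Pairwise pvKeyLe := by
  induction ys with
  | nil => simp [PySem.List.insertBy]
  | cons y t ih =>
    rw [PySem.List.insertBy]
    rcases hb : pvBefore x y with _ | _
    · simp only [Bool.false_eq_true, if_false]
      rw [List.pairwise_cons] at h ⊢
      refine ⟨?_, ih h.2⟩
      intro z hz
      rcases (PySem.List.mem_insertBy pvBefore x z t).mp hz with rfl | hz'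
      · exact pvBefore_false hb
      · exact h.1 z hz'
    · simp only [if_true]
      rw [List.pairwise_cons] at h
      rw [List.pairwise_cons]
      refine ⟨?_, List.pairwise_cons.mpr h⟩
      intro z hz
      rcases List.mem_cons.mp hz with rfl | hz'
      · exact pvBefore_true hb
      · exact pvKeyLe_trans (pvBefore_true hb) (h.1 z hz')

lemma foldl_insertBy_pairwise_pvKeyLe (l : List (String × List (String × Bool)))
    (acc : List (String × List (String × Bool))) (h : acc.Pairwise pvKeyLe) :
    (l.foldl (fun acc x => PySem.List.insertBy pvBefore x acc) acc).Pairwise pvKeyLe := by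
  induction l generalizing acc with
  | nil => exact h
  | cons x t ih => exact ih _ (insertBy_pairwise_pvKeyLe x acc h)

lemma sorted2_eq_foldl (rest : List (String × List (String × Bool))) :
    PySem.List.sorted2 rest (fun nf => pvRank nf.2) (fun nf => nf.1) false
      = rest.foldl (fun acc x => PySem.List.insertBy pvBefore x acc) [] := rfl

-- bucket fold characterisation: final bucket i = initial bucket i ++ (elements of rank i, in order)
lemma pvBuckets_spec (l : List (String × List (String × Bool))) (b : PvBuckets) :
    l.foldl (fun (b : PvBuckets) nf =>
      let structural := (PySem.Dict.mk nf.2).getD "structural" false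
      if (PySem.Dict.mk nf.2).getD "readonly" false then
        (if structural then { b with b5 := b.b5 ++ [nf] } else { b with b4 := b.b4 ++ [nf] })
      else if (PySem.Dict.mk nf.2).getD "required" false then
        (if structural then { b with b1 := b.b1 ++ [nf] } else { b with b0 := b.b0 ++ [nf] })
      else
        (if structural then { b with b3 := b.b3 ++ [nf] } else { b with b2 := b.b2 ++ [nf] })) b
    = ⟨b.b0 ++ l.filter (fun nf => pvRank nf.2 == 0),
       b.b1 ++ l.filter (fun nf => pvRank nf.2 == 1),
       b.b2 ++ l.filter (fun nf => pvRank nf.2 == 2),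
       b.b3 ++ l.filter (fun nf => pvRank nf.2 == 3),
       b.b4 ++ l.filter (fun nf => pvRank nf.2 == 4),
       b.b5 ++ l.filter (fun nf => pvRank nf.2 == 5)⟩ := by
  induction l generalizing b with
  | nil => cases b; simp
  | cons x t ih =>
    rw [List.foldl_cons, ih]
    cases b
    by_cases h1 : (PySem.Dict.mk x.2).getD "readonly" false = true <;>
      by_cases h2 : (PySem.Dict.mk x.2).getD "required" false = true <;>
      by_cases h3 : (PySem.Dict.mk x.2).getD "structural" false = true <;>
      simp [pvRank, h1, h2, h3]

lemma pvRank_le_5 (f : List (String × Bool)) : pvRank f ≤ 5 := by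
  unfold pvRank; dsimp only; split_ifs <;> omega

lemma pvPerm_skip {α : Type} (u : List α) {v t : List α} {x : α} (h : v.Perm (x :: t)) :
    (u ++ v).Perm (x :: (u ++ t)) :=
  (List.Perm.append_left u h).trans List.perm_middle

-- the six rank-filters of l, concatenated, are a permutation of l
lemma pvFilter_partition_perm (l : List (String × List (String × Bool))) :
    (l.filter (fun nf => pvRank nf.2 == 0) ++ (l.filter (fun nf => pvRank nf.2 == 1) ++
     (l.filter (fun nf => pvRank nf.2 == 2) ++ (l.filter (fun nf => pvRank nf.2 == 3) ++
     (l.filter (fun nf => pvRank nf.2 == 4) ++ l.filter (fun nf => pvRank nf.2 == 5)))))).Perm l := by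
  induction l with
  | nil => simp
  | cons x t ih =>
    have hx := pvRank_le_5 x.2
    have hcase : pvRank x.2 = 0 ∨ pvRank x.2 = 1 ∨ pvRank x.2 = 2 ∨ pvRank x.2 = 3 ∨ pvRank x.2 = 4 ∨ pvRank x.2 = 5 := by omega
    simp only [List.filter_cons]
    rcases hcase with h | h | h | h | h | h <;> norm_num [h] <;>
      [ exact ih;
        exact (pvPerm_skip _ (List.Perm.refl _)).trans (ih.cons x);
        exact (pvPerm_skip _ (pvPerm_skip _ (List.Perm.refl _))).trans (ih.cons x);
        exact (pvPerm_skip _ (pvPerm_skip _ (pvPerm_skip _ (List.Perm.refl _)))).trans (ih.cons x);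
        exact (pvPerm_skip _ (pvPerm_skip _ (pvPerm_skip _ (pvPerm_skip _ (List.Perm.refl _))))).trans (ih.cons x);
        exact (pvPerm_skip _ (pvPerm_skip _ (pvPerm_skip _ (pvPerm_skip _ (pvPerm_skip _ (List.Perm.refl _)))))).trans (ih.cons x)]

lemma pvFilter_pairwise (l : List (String × List (String × Bool))) (i : Nat)
    (h : l.Pairwise (fun a b => a.1 ≤ b.1)) :
    (l.filter (fun nf => pvRank nf.2 == i)).Pairwise pvKeyLe := by
  refine (h.filter _).imp_of_mem ?_
  intro a b ha hb hab
  have ha' : pvRank a.2 = i := by simpa using List.of_mem_filter ha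
  have hb' : pvRank b.2 = i := by simpa using List.of_mem_filter hb
  exact Or.inr ⟨ha'.trans hb'.symm, hab⟩

lemma pvFilter_rank {l : List (String × List (String × Bool))} {i : Nat} {a}
    (ha : a ∈ l.filter (fun nf => pvRank nf.2 == i)) : pvRank a.2 = i := by
  simpa using List.of_mem_filter ha

lemma pvConcat_pairwise (l : List (String × List (String × Bool))) (h : l.Pairwise (fun a b => a.1 ≤ b.1)) :
    (l.filter (fun nf => pvRank nf.2 == 0) ++ (l.filter (fun nf => pvRank nf.2 == 1) ++
     (l.filter (fun nf => pvRank nf.2 == 2) ++ (l.filter (fun nf => pvRank nf.2 == 3) ++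
     (l.filter (fun nf => pvRank nf.2 == 4) ++ l.filter (fun nf => pvRank nf.2 == 5)))))).Pairwise pvKeyLe := by
  simp only [List.pairwise_append]
  refine ⟨pvFilter_pairwise l 0 h, ⟨pvFilter_pairwise l 1 h, ⟨pvFilter_pairwise l 2 h,
    ⟨pvFilter_pairwise l 3 h, ⟨pvFilter_pairwise l 4 h, pvFilter_pairwise l 5 h, ?_⟩, ?_⟩, ?_⟩, ?_⟩, ?_⟩ <;>
  · intro a ha b hb
    try simp only [List.mem_append] at hb
    have hra := pvFilter_rank ha
    have : pvRank a.2 < pvRank b.2 := by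
      first
        | (rcases hb with hb | hb | hb | hb | hb <;> (have := pvFilter_rank hb; omega))
        | (rcases hb with hb | hb | hb | hb <;> (have := pvFilter_rank hb; omega))
        | (rcases hb with hb | hb | hb <;> (have := pvFilter_rank hb; omega))
        | (rcases hb with hb | hb <;> (have := pvFilter_rank hb; omega))
        | (have := pvFilter_rank hb; omega)
    exact Or.inl this

-- two elements of a list with nodup names and equal names are equal
lemma pvEq_of_name_eq {l : List (String × List (String × Bool))} (h : (l.map Prod.fst).Nodup)
    {a b : String × List (String × Bool)} (ha : a ∈ l) (hb : b ∈ l) (hn : a.1 = b.1) : a = b :=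
  List.inj_on_of_nodup_map h ha hb hn

-- A's bucket fold, with the top-filter moved out and the buckets named
lemma pvA_buckets (fields : List (String × List (String × Bool))) (top : List String) :
    (PySem.List.sorted fields (fun nf => nf.1) false).foldl (fun (b : PvBuckets) nf =>
      if !(top.contains nf.1) then
        let structural := (PySem.Dict.mk nf.2).getD "structural" false
        if (PySem.Dict.mk nf.2).getD "readonly" false then
          (if structural then { b with b5 := b.b5 ++ [nf] } else { b with b4 := b.b4 ++ [nf] })
        else if (PySem.Dict.mk nf.2).getD "required" false then
          (if structural then { b with b1 := b.b1 ++ [nf] } else { b with b0 := b.b0 ++ [nf] })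
        else
          (if structural then { b with b3 := b.b3 ++ [nf] } else { b with b2 := b.b2 ++ [nf] })
      else b) ⟨[], [], [], [], [], []⟩
    = ⟨((PySem.List.sorted fields (fun nf => nf.1) false).filter (fun nf => !(top.contains nf.1))).filter (fun nf => pvRank nf.2 == 0),
       ((PySem.List.sorted fields (fun nf => nf.1) false).filter (fun nf => !(top.contains nf.1))).filter (fun nf => pvRank nf.2 == 1),
       ((PySem.List.sorted fields (fun nf => nf.1) false).filter (fun nf => !(top.contains nf.1))).filter (fun nf => pvRank nf.2 == 2),
       ((PySem.List.sorted fields (fun nf => nf.1) false).filter (fun nf => !(top.contains nf.1))).filter (fun nf => pvRank nf.2 == 3),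
       ((PySem.List.sorted fields (fun nf => nf.1) false).filter (fun nf => !(top.contains nf.1))).filter (fun nf => pvRank nf.2 == 4),
       ((PySem.List.sorted fields (fun nf => nf.1) false).filter (fun nf => !(top.contains nf.1))).filter (fun nf => pvRank nf.2 == 5)⟩ := by
  rw [PySem.List.foldl_if_eq_foldl_filter (p := fun nf => !(top.contains nf.1))
        (f := (fun (b : PvBuckets) nf =>
      let structural := (PySem.Dict.mk nf.2).getD "structural" false
      if (PySem.Dict.mk nf.2).getD "readonly" false then
        (if structural then { b with b5 := b.b5 ++ [nf] } else { b with b4 := b.b4 ++ [nf] })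
      else if (PySem.Dict.mk nf.2).getD "required" false then
        (if structural then { b with b1 := b.b1 ++ [nf] } else { b with b0 := b.b0 ++ [nf] })
      else
        (if structural then { b with b3 := b.b3 ++ [nf] } else { b with b2 := b.b2 ++ [nf] })))]
  rw [pvBuckets_spec]
  rfl

-- ===== VERDICT (by name: the statement is the Claim_ definition above) =====
theorem collate_fields_py_spec : Claim_equal_collate_fields_py := by
  intro fields top _hdom hpre
  unfold Spec_collate_fields_py collate_fields_py collate_fields_py_alt
  dsimp only
  rw [pvA_buckets]
  dsimp only
  simp only [List.foldl_cons, List.foldl_nil, List.nil_append, List.append_assoc]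
  have hS : ((PySem.List.sorted fields (fun nf => nf.1) false).filter (fun nf => !(top.contains nf.1))).Perm
      (fields.filter (fun nf => !(top.contains nf.1))) :=
    (PySem.List.sorted_perm fields (fun nf => nf.1) false).filter _
  have hpw : ((PySem.List.sorted fields (fun nf => nf.1) false).filter (fun nf => !(top.contains nf.1))).Pairwise
      (fun a b => a.1 ≤ b.1) :=
    (PySem.List.sorted_pairwise fields (fun nf => nf.1)).filter _
  have hnodup : ((fields.filter (fun nf => !(top.contains nf.1))).map Prod.fst).Nodup :=
    hpre.sublist (List.Sublist.map Prod.fst List.filter_sublist)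
  have hpermA := (pvFilter_partition_perm ((PySem.List.sorted fields (fun nf => nf.1) false).filter (fun nf => !(top.contains nf.1)))).trans hS
  have hpermB : (PySem.List.sorted2 (fields.filter (fun nf => !(top.contains nf.1))) (fun nf => pvRank nf.2) (fun nf => nf.1) false).Perm
      (fields.filter (fun nf => !(top.contains nf.1))) :=
    PySem.List.sorted2_perm _ _ _ _
  have hpwA := pvConcat_pairwise _ hpw
  have hpwB : (PySem.List.sorted2 (fields.filter (fun nf => !(top.contains nf.1))) (fun nf => pvRank nf.2) (fun nf => nf.1) false).Pairwise pvKeyLe := by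
    rw [sorted2_eq_foldl]
    exact foldl_insertBy_pairwise_pvKeyLe _ _ (List.Pairwise.nil)
  have hrest : (((PySem.List.sorted fields (fun nf => nf.1) false).filter (fun nf => !(top.contains nf.1))).filter (fun nf => pvRank nf.2 == 0) ++
      (((PySem.List.sorted fields (fun nf => nf.1) false).filter (fun nf => !(top.contains nf.1))).filter (fun nf => pvRank nf.2 == 1) ++
      (((PySem.List.sorted fields (fun nf => nf.1) false).filter (fun nf => !(top.contains nf.1))).filter (fun nf => pvRank nf.2 == 2) ++
      (((PySem.List.sorted fields (fun nf => nf.1) false).filter (fun nf => !(top.contains nf.1))).filter (fun nf => pvRank nf.2 == 3) ++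
      (((PySem.List.sorted fields (fun nf => nf.1) false).filter (fun nf => !(top.contains nf.1))).filter (fun nf => pvRank nf.2 == 4) ++
       ((PySem.List.sorted fields (fun nf => nf.1) false).filter (fun nf => !(top.contains nf.1))).filter (fun nf => pvRank nf.2 == 5))))))
      = PySem.List.sorted2 (fields.filter (fun nf => !(top.contains nf.1))) (fun nf => pvRank nf.2) (fun nf => nf.1) false := by
    refine List.eq_of_perm_of_sorted ?_ hpwA hpwB (hpermA.trans hpermB.symm)
    intro a b ha hb hab hba
    have ha' := hpermA.mem_iff.mp ha
    have hb' := hpermB.mem_iff.mp hb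
    refine pvEq_of_name_eq hnodup ha' hb' ?_
    rcases hab with h1 | ⟨h1, h1'⟩ <;> rcases hba with h2 | ⟨h2, h2'⟩ <;> first
      | omega
      | exact le_antisymm h1' h2'
  rw [hrest]
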